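-- pv_equiv track=rewrite | github.com/wowns1484/Algorithm | Programmers/Level1/부족한 금액 계산하기.py | solution
-- ===== SOURCE A (Python) =====
-- def solution(price, money, count):
--     total = 0
--     for i in range(count):
--         total += price * (i+1)
--
--     if total > money:
--         answer = total - money
--     else:
--         answer = 0
--
--     return answer
-- ===== SOURCE B (Python) =====
-- def solution(price, money, count):
--     total = price * count * (count + 1) // 2 if count > 0 else 0
--     return max(total - money, 0)
-- ===== Notes on version B (the rewrite author's own statement) =====
-- stated objective: faster
-- what changed: Replaced the O(count) accumulation loop with the arithmetic-series closed form price*count*(count+1)//2 and max() for the clamp.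
import Mathlib
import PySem

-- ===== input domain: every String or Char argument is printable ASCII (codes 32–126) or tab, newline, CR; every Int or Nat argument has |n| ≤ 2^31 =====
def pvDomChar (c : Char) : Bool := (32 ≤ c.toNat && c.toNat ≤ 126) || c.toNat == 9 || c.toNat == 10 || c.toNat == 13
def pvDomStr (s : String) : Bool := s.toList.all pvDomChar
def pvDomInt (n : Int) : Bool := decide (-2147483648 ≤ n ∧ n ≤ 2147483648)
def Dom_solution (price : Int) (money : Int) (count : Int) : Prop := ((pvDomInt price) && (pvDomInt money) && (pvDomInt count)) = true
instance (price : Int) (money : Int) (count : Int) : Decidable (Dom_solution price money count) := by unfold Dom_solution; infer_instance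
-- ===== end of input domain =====

-- B replaces A's O(count) summation loop with the closed-form arithmetic series (O(1)); return value only.

-- ===== PORT A =====
def solution (price : Int) (money : Int) (count : Int) : Int :=
  let total := (PySem.List.pyRange 0 count 1).foldl (fun t i => t + price * (i + 1)) 0
  if total > money then total - money else 0

-- ===== PORT B =====
def solution_alt (price : Int) (money : Int) (count : Int) : Int :=
  let total := if count > 0 then PySem.Int.floordiv (price * count * (count + 1)) 2 else 0
  max (total - money) 0

-- ===== PRECONDITION & SPEC =====
def Spec_solution (price : Int) (money : Int) (count : Int) (out : Int) : Prop := out = solution_alt price money count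
instance (price : Int) (money : Int) (count : Int) (out : Int) : Decidable (Spec_solution price money count out) := by unfold Spec_solution; infer_instance

-- ===== CLAIM (what is proved, stated in full; the proofs are below) =====
def Claim_equal_solution : Prop := ∀ (price : Int) (money : Int) (count : Int), Dom_solution price money count → Spec_solution price money count (solution price money count)

-- ===== LEMMAS AND PROOFS =====

-- A's loop total, doubled, is price*m*(m+1) (over natural range length m, arbitrary accumulator)
theorem sum_loop_closed (price : Int) (m : Nat) (a : Int) :
    2 * ((List.range m).foldl (fun (t : Int) (k : Nat) => t + price * ((k : Int) + 1)) a) =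
      2 * a + price * m * (m + 1) := by
  induction m generalizing a with
  | zero => simp
  | succ n ih =>
      rw [List.range_succ, List.foldl_append]
      simp only [List.foldl_cons, List.foldl_nil]
      push_cast
      linear_combination ih a

theorem total_eq (price : Int) (count : Int) :
    (PySem.List.pyRange 0 count 1).foldl (fun t i => t + price * (i + 1)) 0 =
      (if count > 0 then PySem.Int.floordiv (price * count * (count + 1)) 2 else 0) := by
  rw [PySem.List.pyRange_one]
  rw [List.foldl_map]
  simp only [sub_zero, zero_add]
  by_cases h : count > 0
  · simp only [h, if_pos]
    have hc : ((count.toNat : Int)) = count := Int.toNat_of_nonneg (le_of_lt h)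
    have h2 := sum_loop_closed price count.toNat 0
    rw [hc] at h2
    rw [PySem.Int.floordiv_eq_ediv_of_pos (by norm_num)]
    omega
  · simp only [h, if_false]
    have : count.toNat = 0 := by omega
    simp [this]

-- ===== VERDICT (by name: the statement is the Claim_ definition above) =====
theorem solution_spec : Claim_equal_solution := by
  intro price money count _
  unfold Spec_solution solution solution_alt
  dsimp only
  rw [total_eq]
  set t := (if count > 0 then PySem.Int.floordiv (price * count * (count + 1)) 2 else 0) with ht
  clear_value t
  split_ifs with h <;> omega
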